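-- pv_equiv track=rewrite | github.com/SMTG-Bham/sumo | vaspy/electronic_structure/electronic_structure.py | sort_orbitals
-- ===== SOURCE A (Python) =====
-- def sort_orbitals(el_pdoss):
--     """Get the sorted orbitals of a pdoss
--
--     Sort the orbitals based in a standard format. E.g. s -> p -> d.
--     Will also sort individual orbitals. This is useful for plotting/saving.
--
--     Args:
--         pdoss: An element pdoss in the form {Orbital: dens}
--
--     Returns:
--         A list of the sorted orbitals
--     """
--     sorted_orbitals = ['s', 'p', 'py', 'pz', 'px', 'd', 'dxy', 'dyz', 'dz2',
--                        'dxz', 'dx2-y2', 'f', 'f-3', 'f-2', 'f-1', 'f-0', 'f1', 'f2',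
--                        'f3']
--     sorted_keys = []
--     unsorted_keys = el_pdoss.keys()
--     for key in sorted_orbitals:
--         if key in unsorted_keys:
--             sorted_keys.append(key)
--     return sorted_keys
-- ===== SOURCE B (Python) =====
-- def sort_orbitals(el_pdoss):
--     """Get the sorted orbitals of a pdoss (rank-table variant)."""
--     sorted_orbitals = ['s', 'p', 'py', 'pz', 'px', 'd', 'dxy', 'dyz', 'dz2',
--                        'dxz', 'dx2-y2', 'f', 'f-3', 'f-2', 'f-1', 'f-0', 'f1', 'f2',
--                        'f3']
--     rank = {orb: i for i, orb in enumerate(sorted_orbitals)}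
--     return sorted((k for k in el_pdoss if k in rank), key=rank.get)
-- ===== Notes on version B (the rewrite author's own statement) =====
-- stated objective: idiomatic
-- what changed: Replaces the scan over the canonical orbital list testing membership in the input with a rank table built once from the canonical order, then a sort of the input's recognised keys by their rank.
import Mathlib
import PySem

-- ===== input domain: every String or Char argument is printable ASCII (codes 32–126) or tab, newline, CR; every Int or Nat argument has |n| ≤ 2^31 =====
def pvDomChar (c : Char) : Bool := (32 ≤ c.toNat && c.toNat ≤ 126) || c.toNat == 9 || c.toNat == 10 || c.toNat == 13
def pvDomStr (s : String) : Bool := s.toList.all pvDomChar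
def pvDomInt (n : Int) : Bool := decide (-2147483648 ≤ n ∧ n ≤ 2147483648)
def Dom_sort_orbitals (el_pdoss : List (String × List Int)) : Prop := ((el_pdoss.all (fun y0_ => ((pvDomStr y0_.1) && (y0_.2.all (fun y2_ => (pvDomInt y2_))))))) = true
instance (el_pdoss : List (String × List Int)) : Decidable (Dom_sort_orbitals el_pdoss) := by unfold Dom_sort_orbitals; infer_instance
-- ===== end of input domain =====

-- B builds a rank table from the canonical orbital order and sorts the input's recognised keys by rank,
-- instead of A's scan over the canonical list filtering by membership in the input; same results, alternative shape.


-- ===== PORT A =====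
def sort_orbitals (el_pdoss : List (String × List Int)) : List String :=
  let sorted_orbitals : List String :=
    ["s", "p", "py", "pz", "px", "d", "dxy", "dyz", "dz2",
     "dxz", "dx2-y2", "f", "f-3", "f-2", "f-1", "f-0", "f1", "f2", "f3"]
  let unsorted_keys := (PySem.Dict.ofList el_pdoss).keys
  sorted_orbitals.foldl
    (fun sorted_keys key =>
      if unsorted_keys.contains key then sorted_keys ++ [key] else sorted_keys) []

-- ===== PORT B =====
-- canonical orbital order (Source B's sorted_orbitals literal)
def pvCanonical : List String :=
  ["s", "p", "py", "pz", "px", "d", "dxy", "dyz", "dz2",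
   "dxz", "dx2-y2", "f", "f-3", "f-2", "f-1", "f-0", "f1", "f2", "f3"]

-- rank = {orb: i for i, orb in enumerate(sorted_orbitals)}
def pvRank : PySem.Dict String Int :=
  (PySem.List.enumerate pvCanonical).foldl
    (fun d p => d.insert p.2 p.1) PySem.Dict.empty

-- sorted((k for k in el_pdoss if k in rank), key=rank.get); every kept key is in rank,
-- so rank.get never returns None there: ported as getD _ 0.
def sort_orbitals_alt (el_pdoss : List (String × List Int)) : List String :=
  PySem.List.sorted
    (((PySem.Dict.ofList el_pdoss).keys).filter (fun k => pvRank.contains k))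
    (fun k => pvRank.getD k 0) false

-- ===== PRECONDITION & SPEC =====
def Spec_sort_orbitals (el_pdoss : List (String × List Int)) (out : List String) : Prop := out = sort_orbitals_alt el_pdoss
instance (el_pdoss : List (String × List Int)) (out : List String) : Decidable (Spec_sort_orbitals el_pdoss out) := by unfold Spec_sort_orbitals; infer_instance

-- ===== CLAIM (what is proved, stated in full; the proofs are below) =====
def Claim_equal_sort_orbitals : Prop := ∀ (el_pdoss : List (String × List Int)), Dom_sort_orbitals el_pdoss → Spec_sort_orbitals el_pdoss (sort_orbitals el_pdoss)

-- ===== LEMMAS AND PROOFS =====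

lemma pvRank_keys : pvRank.keys = pvCanonical := by decide

lemma pvRank_contains (k : String) : pvRank.contains k = pvCanonical.contains k := by
  rw [PySem.Dict.contains_eq_decide_mem_keys, pvRank_keys]
  simp

lemma pvCanonical_pairwise :
    pvCanonical.Pairwise (fun a b => pvRank.getD a 0 < pvRank.getD b 0) := by decide

lemma sort_orbitals_eq_filter (el_pdoss : List (String × List Int)) :
    sort_orbitals el_pdoss
      = pvCanonical.filter (fun k => ((PySem.Dict.ofList el_pdoss).keys).contains k) := by
  unfold sort_orbitals
  rw [PySem.List.foldl_append_if_eq_filter]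
  rfl

-- ===== VERDICT (by name: the statement is the Claim_ definition above) =====
theorem sort_orbitals_spec : Claim_equal_sort_orbitals := by
  intro el_pdoss _
  unfold Spec_sort_orbitals sort_orbitals_alt
  rw [sort_orbitals_eq_filter]
  set ks := (PySem.Dict.ofList el_pdoss).keys with hks
  have hksnd : ks.Nodup := PySem.Dict.nodup_keys_ofList el_pdoss
  have hperm : (pvCanonical.filter (fun k => ks.contains k)).Perm
      (ks.filter (fun k => pvRank.contains k)) := by
    rw [List.perm_ext_iff_of_nodup
      ((by decide : pvCanonical.Nodup).filter _) (hksnd.filter _)]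
    intro a
    simp only [List.mem_filter, pvRank_contains, List.contains_iff_mem]
    tauto
  have hpair := pvCanonical_pairwise.sublist
    (List.filter_sublist (l := pvCanonical) (p := fun k => ks.contains k))
  exact (PySem.List.sorted_eq_of_perm_of_pairwise_lt _ _
    (fun k => pvRank.getD k 0) hperm hpair).symm
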